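-- pv_equiv track=rewrite | github.com/di2pf/codility_ | L12.1/ChocolatesByNumbers_naive.py | getNumberChocolatesEaten
-- ===== SOURCE A (Python) =====
-- def getNumberChocolatesEaten(totalNumChocolates, stepsToNextPos):
--     """
--     The function calculates the number of chocolates to be eaten until a wrapper is met. Chocolates are aranged in a circle.
--     When a chocolate is eaten it replaced with a wrapper.
--
--     Args:
--         totalNumChocolates (int): An integer from the interval [1..1,000,000,000], which represents total number chocolates given.
--         stepsToNextPos (int): An integer from the interval [1..1,000,000,000]. currentPosition + stepsToNextPos = nextPosition
--
--     Returns: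
--         int: The number of eaten chocolates.
--     """
--     eatenCount = 0
--     wrappers = []
--     currPos = 0
--     while(True):
--         if (currPos not in wrappers):
--             eatenCount = eatenCount + 1
--             wrappers.append(currPos)
--         else:
--             return eatenCount
--         currPos = (currPos + stepsToNextPos) % totalNumChocolates
-- ===== SOURCE B (Python) =====
-- def getNumberChocolatesEaten(totalNumChocolates, stepsToNextPos):
--     # Number of distinct positions visited = N / gcd(N, M), via Euclid's algorithm.
--     def _gcd(a, b):
--         return a if b == 0 else _gcd(b, a % b)
--     g = _gcd(abs(totalNumChocolates), abs(stepsToNextPos))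
--     return abs(totalNumChocolates) // g
-- ===== Notes on version B (the rewrite author's own statement) =====
-- stated objective: faster
-- what changed: Replaced the O(N^2) simulation (walk the circle keeping a list of visited positions with a linear membership scan) by the closed form |N| // gcd(N, M) computed with Euclid's algorithm.
import Mathlib
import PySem

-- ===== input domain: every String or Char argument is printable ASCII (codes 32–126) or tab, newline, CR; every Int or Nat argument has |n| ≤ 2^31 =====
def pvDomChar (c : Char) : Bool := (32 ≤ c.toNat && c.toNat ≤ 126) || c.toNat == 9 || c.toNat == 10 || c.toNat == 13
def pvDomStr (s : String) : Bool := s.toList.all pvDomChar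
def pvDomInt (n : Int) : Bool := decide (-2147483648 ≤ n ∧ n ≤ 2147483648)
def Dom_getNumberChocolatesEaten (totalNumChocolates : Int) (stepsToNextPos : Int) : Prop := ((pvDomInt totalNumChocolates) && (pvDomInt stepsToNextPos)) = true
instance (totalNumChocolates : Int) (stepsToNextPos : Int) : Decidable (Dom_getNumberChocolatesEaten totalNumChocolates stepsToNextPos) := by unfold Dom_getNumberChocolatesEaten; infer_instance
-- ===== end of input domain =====

-- B replaces A's O(N^2) circle-walk simulation by the closed form |N| // gcd(N, M) via Euclid;
-- equivalence of RETURN values is proved on totalNumChocolates ≠ 0 (A raises ZeroDivisionError at 0).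

-- ===== PORT A =====
-- A's 'while True' loop, transliterated with a fuel counter that only makes it total:
-- |totalNumChocolates| + 1 iterations always suffice (proved below), so the fuel-0 branch is never hit on Pre_.
def pvLoopA (totalNumChocolates stepsToNextPos : Int) : Nat → List Int → Int → Int → Int
  | 0, _, _, eatenCount => eatenCount
  | fuel + 1, wrappers, currPos, eatenCount =>
    if currPos ∉ wrappers then
      pvLoopA totalNumChocolates stepsToNextPos fuel (wrappers ++ [currPos])
        (PySem.Int.mod (currPos + stepsToNextPos) totalNumChocolates) (eatenCount + 1)
    else eatenCount

def getNumberChocolatesEaten (totalNumChocolates : Int) (stepsToNextPos : Int) : Int :=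
  pvLoopA totalNumChocolates stepsToNextPos (totalNumChocolates.natAbs + 1) [] 0 0

-- ===== PORT B =====
-- B's recursive Euclid '_gcd(a, b) = a if b == 0 else _gcd(b, a % b)', with a fuel counter that
-- only makes it total: |b| + 1 calls always suffice since |a % b| < |b|.
def pvGcd : Nat → Int → Int → Int
  | 0, a, _ => a
  | fuel + 1, a, b => if b = 0 then a else pvGcd fuel b (PySem.Int.mod a b)

def getNumberChocolatesEaten_alt (totalNumChocolates : Int) (stepsToNextPos : Int) : Int :=
  PySem.Int.floordiv |totalNumChocolates|
    (pvGcd (stepsToNextPos.natAbs + 1) |totalNumChocolates| |stepsToNextPos|)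

-- ===== PRECONDITION & SPEC =====
-- Pre_ excludes exactly totalNumChocolates = 0, where A raises ZeroDivisionError ('% 0') and returns nothing.
def Pre_getNumberChocolatesEaten (totalNumChocolates : Int) (stepsToNextPos : Int) : Prop :=
  totalNumChocolates ≠ 0
instance (totalNumChocolates : Int) (stepsToNextPos : Int) : Decidable (Pre_getNumberChocolatesEaten totalNumChocolates stepsToNextPos) := by unfold Pre_getNumberChocolatesEaten; infer_instance

def pvWitness_getNumberChocolatesEaten : Int × Int := (10, 4)

def Spec_getNumberChocolatesEaten (totalNumChocolates : Int) (stepsToNextPos : Int) (out : Int) : Prop := out = getNumberChocolatesEaten_alt totalNumChocolates stepsToNextPos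
instance (totalNumChocolates : Int) (stepsToNextPos : Int) (out : Int) : Decidable (Spec_getNumberChocolatesEaten totalNumChocolates stepsToNextPos out) := by unfold Spec_getNumberChocolatesEaten; infer_instance

-- ===== CLAIM (what is proved, stated in full; the proofs are below) =====
def Claim_equal_getNumberChocolatesEaten : Prop := ∀ (totalNumChocolates : Int) (stepsToNextPos : Int), Dom_getNumberChocolatesEaten totalNumChocolates stepsToNextPos → Pre_getNumberChocolatesEaten totalNumChocolates stepsToNextPos → Spec_getNumberChocolatesEaten totalNumChocolates stepsToNextPos (getNumberChocolatesEaten totalNumChocolates stepsToNextPos)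

-- ===== LEMMAS AND PROOFS =====

-- The orbit length: |N| / gcd(|N|, |M|).
def pvOrbitLen (N M : Int) : Nat := N.natAbs / Nat.gcd N.natAbs M.natAbs

-- Euclid's recursion computes Nat.gcd (fuel b < fuel suffices).
lemma pvGcd_natCast (fuel a b : Nat) (h : b < fuel) :
    pvGcd fuel (a : Int) (b : Int) = ((Nat.gcd b a : Nat) : Int) := by
  induction fuel generalizing a b with
  | zero => omega
  | succ fuel ih =>
    by_cases hb : b = 0
    · subst hb; simp [pvGcd]
    · have hb' : ((b : Nat) : Int) ≠ 0 := by exact_mod_cast hb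
      have hlt : a % b < fuel := by
        have := Nat.mod_lt a (Nat.pos_of_ne_zero hb); omega
      rw [pvGcd, if_neg hb', PySem.Int.mod_natCast, ih b (a % b) hlt, Nat.gcd_rec b a]

-- Python-mod congruence: two values have equal 'x % N' iff they differ by a multiple of N.
lemma pvMod_eq_iff (a b N : Int) (hN : N ≠ 0) :
    PySem.Int.mod a N = PySem.Int.mod b N ↔ N ∣ (a - b) := by
  have ea := PySem.Int.floordiv_mul_add_mod a N
  have eb := PySem.Int.floordiv_mul_add_mod b N
  constructor
  · intro h
    exact ⟨PySem.Int.floordiv a N - PySem.Int.floordiv b N, by linear_combination (-1 : Int) * ea + eb + h⟩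
  · rintro ⟨k, hk⟩
    have hd : N ∣ (PySem.Int.mod a N - PySem.Int.mod b N) :=
      ⟨k - PySem.Int.floordiv a N + PySem.Int.floordiv b N, by linear_combination ea - eb + hk⟩
    have hz : PySem.Int.mod a N - PySem.Int.mod b N = 0 := by
      apply Int.eq_zero_of_dvd_of_natAbs_lt_natAbs hd
      rcases lt_or_gt_of_ne hN with h1 | h1
      · have ba := PySem.Int.mod_neg_bounds (a := a) h1
        have bb := PySem.Int.mod_neg_bounds (a := b) h1
        omega
      · have b1 := PySem.Int.mod_nonneg (a := a) h1
        have b2 := PySem.Int.mod_lt (a := a) h1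
        have b3 := PySem.Int.mod_nonneg (a := b) h1
        have b4 := PySem.Int.mod_lt (a := b) h1
        omega
    omega

lemma pvMod_add (a b N : Int) (hN : N ≠ 0) :
    PySem.Int.mod (PySem.Int.mod a N + b) N = PySem.Int.mod (a + b) N := by
  rw [pvMod_eq_iff _ _ _ hN]
  have ea := PySem.Int.floordiv_mul_add_mod a N
  exact ⟨-(PySem.Int.floordiv a N), by linear_combination ea⟩

-- In Nat: n ∣ t*m ↔ (n / gcd n m) ∣ t   (for n > 0).
lemma pvDvd_key (n m t : Nat) (hn : 0 < n) :
    n ∣ t * m ↔ (n / Nat.gcd n m) ∣ t := by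
  set g := Nat.gcd n m with hg
  have hgpos : 0 < g := Nat.gcd_pos_of_pos_left m hn
  have hgn : g ∣ n := Nat.gcd_dvd_left n m
  have hgm : g ∣ m := Nat.gcd_dvd_right n m
  have cop : Nat.Coprime (n / g) (m / g) := Nat.coprime_div_gcd_div_gcd hgpos
  constructor
  · intro h
    have h2 : g * (n / g) ∣ g * (t * (m / g)) := by
      have e1 : g * (n / g) = n := Nat.mul_div_cancel' hgn
      have e2 : g * (t * (m / g)) = t * m := by
        conv_rhs => rw [← Nat.mul_div_cancel' hgm]
        ring
      rw [e1, e2]; exact h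
    have h3 : (n / g) ∣ t * (m / g) := (Nat.mul_dvd_mul_iff_left hgpos).mp h2
    exact cop.dvd_of_dvd_mul_right h3
  · intro h
    calc n = (n / g) * g := (Nat.div_mul_cancel hgn).symm
      _ ∣ t * g := Nat.mul_dvd_mul h dvd_rfl
      _ ∣ t * m := Nat.mul_dvd_mul_left t hgm

-- Bridge to Int divisibility of step multiples.
lemma pvDvd_bridge (N M : Int) (hN : N ≠ 0) (t : Nat) :
    N ∣ ((t : Int) * M) ↔ pvOrbitLen N M ∣ t := by
  have h1 : N ∣ ((t : Int) * M) ↔ N.natAbs ∣ ((t : Int) * M).natAbs := (Int.natAbs_dvd_natAbs).symm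
  rw [h1, Int.natAbs_mul, Int.natAbs_natCast,
    pvDvd_key N.natAbs M.natAbs t (by omega)]
  rfl

lemma pvOrbitLen_pos (N M : Int) (hN : N ≠ 0) : 0 < pvOrbitLen N M := by
  apply Nat.div_pos (Nat.gcd_le_left _ (by omega)) (Nat.gcd_pos_of_pos_left _ (by omega))

lemma pvOrbitLen_le (N M : Int) : pvOrbitLen N M ≤ N.natAbs := Nat.div_le_self _ _

-- Two step-multiples collide mod N iff the orbit length divides the index gap.
lemma pvStep_eq_iff (N M : Int) (hN : N ≠ 0) (j k : Nat) (hj : j ≤ k) :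
    PySem.Int.mod ((j : Int) * M) N = PySem.Int.mod ((k : Int) * M) N ↔
    pvOrbitLen N M ∣ (k - j) := by
  rw [pvMod_eq_iff _ _ _ hN, ← pvDvd_bridge N M hN (k - j)]
  have e : ((k - j : Nat) : Int) = (k : Int) - (j : Int) := by omega
  constructor <;> intro h
  · have e2 : ((k - j : Nat) : Int) * M = -((j : Int) * M - (k : Int) * M) := by rw [e]; ring
    rw [e2]; exact dvd_neg.mpr h
  · have e2 : (j : Int) * M - (k : Int) * M = -(((k - j : Nat) : Int) * M) := by rw [e]; ring
    rw [e2]; exact dvd_neg.mpr h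

-- Loop invariant: after k steps the wrappers are exactly the first k step-multiples mod N,
-- and the loop returns the orbit length.
lemma pvLoopA_inv (N M : Int) (hN : N ≠ 0) (fuel : Nat) :
    ∀ k : Nat, k ≤ pvOrbitLen N M → pvOrbitLen N M - k < fuel →
    pvLoopA N M fuel ((List.range k).map (fun j : Nat => PySem.Int.mod ((j : Int) * M) N))
      (PySem.Int.mod ((k : Int) * M) N) (k : Int) = (pvOrbitLen N M : Int) := by
  induction fuel with
  | zero => intro k hk hf; omega
  | succ fuel ih =>
    intro k hk hf
    have hmem : (PySem.Int.mod ((k : Int) * M) N ∈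
        (List.range k).map (fun j : Nat => PySem.Int.mod ((j : Int) * M) N)) ↔
        ∃ j < k, pvOrbitLen N M ∣ (k - j) := by
      simp only [List.mem_map, List.mem_range]
      constructor
      · rintro ⟨j, hj, hje⟩
        exact ⟨j, hj, (pvStep_eq_iff N M hN j k (le_of_lt hj)).mp hje⟩
      · rintro ⟨j, hj, hd⟩
        exact ⟨j, hj, (pvStep_eq_iff N M hN j k (le_of_lt hj)).mpr hd⟩
    by_cases hkL : k = pvOrbitLen N M
    · -- back at the start: 0 is already a wrapper
      have hmem' : PySem.Int.mod ((k : Int) * M) N ∈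
          (List.range k).map (fun j : Nat => PySem.Int.mod ((j : Int) * M) N) := by
        rw [hmem]
        exact ⟨0, by have := pvOrbitLen_pos N M hN; omega, by simp [hkL]⟩
      rw [pvLoopA, if_neg (by simpa using hmem')]
      exact_mod_cast hkL
    · have hklt : k < pvOrbitLen N M := lt_of_le_of_ne hk hkL
      have hnomem : ¬ (PySem.Int.mod ((k : Int) * M) N ∈
          (List.range k).map (fun j : Nat => PySem.Int.mod ((j : Int) * M) N)) := by
        rw [hmem]
        rintro ⟨j, hj, hdvd⟩
        have := Nat.le_of_dvd (by omega) hdvd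
        omega
      rw [pvLoopA, if_pos (by simpa using hnomem)]
      have e1 : (List.range k).map (fun j : Nat => PySem.Int.mod ((j : Int) * M) N) ++
          [PySem.Int.mod ((k : Int) * M) N] =
          (List.range (k + 1)).map (fun j : Nat => PySem.Int.mod ((j : Int) * M) N) := by
        rw [List.range_succ, List.map_append]; rfl
      have e2 : PySem.Int.mod (PySem.Int.mod ((k : Int) * M) N + M) N =
          PySem.Int.mod (((k + 1 : Nat) : Int) * M) N := by
        rw [pvMod_add _ _ _ hN]; congr 1; push_cast; ring
      rw [e1, e2]
      have e3 : ((k : Int) + 1) = ((k + 1 : Nat) : Int) := by push_cast; ring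
      rw [e3]
      exact ih (k + 1) (by omega) (by omega)

-- ===== VERDICT (by name: the statement is the Claim_ definition above) =====
theorem getNumberChocolatesEaten_spec : Claim_equal_getNumberChocolatesEaten := by
  intro N M _ hPre
  have hN : N ≠ 0 := hPre
  unfold Spec_getNumberChocolatesEaten getNumberChocolatesEaten getNumberChocolatesEaten_alt
  -- A's side: the loop returns the orbit length
  have hA := pvLoopA_inv N M hN (N.natAbs + 1) 0 (Nat.zero_le _)
    (by have := pvOrbitLen_le N M; omega)
  simp only [List.range_zero, List.map_nil, Nat.cast_zero, zero_mul] at hA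
  have hmod0 : PySem.Int.mod (0 : Int) N = 0 := by
    rw [PySem.Int.mod_eq_zero_iff_dvd]; exact dvd_zero N
  rw [hmod0] at hA
  rw [hA]
  -- B's side: Euclid then floor division
  have habsN : |N| = ((N.natAbs : Nat) : Int) := by exact_mod_cast Int.abs_eq_natAbs N
  have habsM : |M| = ((M.natAbs : Nat) : Int) := by exact_mod_cast Int.abs_eq_natAbs M
  rw [habsN, habsM, pvGcd_natCast _ _ _ (by omega), PySem.Int.floordiv_natCast]
  unfold pvOrbitLen
  rw [Nat.gcd_comm M.natAbs N.natAbs]
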